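-- pv_equiv track=rewrite | github.com/jtuttle/advent-of-code | 2015/day-11.py | has_two_pairs
-- ===== SOURCE A (Python) =====
-- def has_two_pairs(pw):
--     count = 0
--
--     i = 0
--
--     while i < len(pw) - 1:
--         if pw[i] == pw[i+1]:
--             count += 1
--
--             if count == 2:
--                 return True
--
--             i += 1
--
--         i += 1
--
--     return False
-- ===== SOURCE B (Python) =====
-- def has_two_pairs(pw):
--     total = 0
--     run = 1
--     for j in range(1, len(pw)):
--         if pw[j] == pw[j - 1]:
--             run += 1
--         else:
--             total += run // 2
--             run = 1
--     total += run // 2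
--     return total >= 2
-- ===== Notes on version B (the rewrite author's own statement) =====
-- stated objective: alternative
-- what changed: Replaces the index-stepping loop that skips one position after each matched pair (with an early return at count==2) by run-length encoding: sum floor(run_length/2) over maximal runs of equal characters and compare the total against 2.
import Mathlib
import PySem

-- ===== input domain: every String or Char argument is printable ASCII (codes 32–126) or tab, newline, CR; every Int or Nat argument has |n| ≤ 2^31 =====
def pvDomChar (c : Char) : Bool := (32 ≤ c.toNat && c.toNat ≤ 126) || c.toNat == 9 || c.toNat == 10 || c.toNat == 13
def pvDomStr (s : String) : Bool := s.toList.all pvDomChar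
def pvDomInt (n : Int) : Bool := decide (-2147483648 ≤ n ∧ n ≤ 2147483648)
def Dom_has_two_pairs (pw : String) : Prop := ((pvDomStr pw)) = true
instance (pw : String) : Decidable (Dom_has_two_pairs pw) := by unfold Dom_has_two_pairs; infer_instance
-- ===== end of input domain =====

-- B replaces A's skip-one-after-match index loop (early return at count 2) by
-- run-length encoding: sum run_length/2 over maximal runs, compare with 2 (alternative, same cost).


-- ===== PORT A =====
-- A's while loop over index i with counter and skip-one-after-match, early return at count == 2.
def hasTwoPairsLoopA (l : List Char) (i : Nat) (count : Nat) : Bool :=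
  if h : i + 1 < l.length then
    if l[i]'(by omega) = l[i + 1] then
      if count + 1 == 2 then true
      else hasTwoPairsLoopA l (i + 2) (count + 1)
    else hasTwoPairsLoopA l (i + 1) count
  else false
termination_by l.length - i

def has_two_pairs (pw : String) : Bool := hasTwoPairsLoopA pw.toList 0 0

-- ===== PORT B =====
-- B's for-loop comparing pw[j] with pw[j-1], maintaining the current run length and the total;
-- structural recursion on the remaining characters with prev = pw[j-1].
def hasTwoPairsRuns : List Char → Char → Nat → Nat → Nat
  | [], _, run, total => total + run / 2
  | c :: rest, prev, run, total =>
      if c = prev then hasTwoPairsRuns rest c (run + 1) total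
      else hasTwoPairsRuns rest c 1 (total + run / 2)

def has_two_pairs_alt (pw : String) : Bool :=
  match pw.toList with
  | [] => decide (0 + 1 / 2 ≥ 2)          -- empty loop: total = 0 + run // 2 with run = 1
  | c :: rest => decide (hasTwoPairsRuns rest c 1 0 ≥ 2)

-- ===== PRECONDITION & SPEC =====
def Spec_has_two_pairs (pw : String) (out : Bool) : Prop := out = has_two_pairs_alt pw
instance (pw : String) (out : Bool) : Decidable (Spec_has_two_pairs pw out) := by unfold Spec_has_two_pairs; infer_instance

-- ===== CLAIM (what is proved, stated in full; the proofs are below) =====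
def Claim_equal_has_two_pairs : Prop := ∀ (pw : String), Dom_has_two_pairs pw → Spec_has_two_pairs pw (has_two_pairs pw)

-- ===== LEMMAS AND PROOFS =====

-- Greedy count of non-overlapping adjacent equal pairs (specification common to both ports).
def pvPairs : List Char → Nat
  | a :: b :: rest => if a = b then 1 + pvPairs rest else pvPairs (b :: rest)
  | _ => 0

theorem pvPairs_short (l : List Char) (h : l.length ≤ 1) : pvPairs l = 0 := by
  match l with
  | [] => rfl
  | [_] => rfl
  | _ :: _ :: _ => simp at h

theorem pvPairs_replicate (n : Nat) (c : Char) : pvPairs (List.replicate n c) = n / 2 := by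
  induction n using Nat.strong_induction_on with
  | _ n ih =>
    match n with
    | 0 => rfl
    | 1 => rfl
    | (m + 2) =>
      have : List.replicate (m + 2) c = c :: c :: List.replicate m c := rfl
      rw [this]
      simp only [pvPairs, if_true, ih m (by omega)]
      omega

theorem pvPairs_replicate_append (n : Nat) (c d : Char) (hne : d ≠ c) (rest : List Char) :
    pvPairs (List.replicate n c ++ d :: rest) = n / 2 + pvPairs (d :: rest) := by
  induction n using Nat.strong_induction_on with
  | _ n ih =>
    match n with
    | 0 => simp
    | 1 =>
      simp only [List.replicate, List.cons_append, List.nil_append, pvPairs]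
      rw [if_neg (by exact fun h => hne h.symm)]
      omega
    | (m + 2) =>
      have : List.replicate (m + 2) c ++ d :: rest
           = c :: c :: (List.replicate m c ++ d :: rest) := rfl
      rw [this]
      simp only [pvPairs, if_true, ih m (by omega)]
      omega

theorem runs_eq_pairs (l : List Char) (prev : Char) (run total : Nat) :
    hasTwoPairsRuns l prev run total = total + pvPairs (List.replicate run prev ++ l) := by
  induction l generalizing prev run total with
  | nil => simp [hasTwoPairsRuns, pvPairs_replicate]
  | cons c rest ih =>
    simp only [hasTwoPairsRuns]
    split
    · next h =>
      subst h
      rw [ih]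
      congr 1
      have : List.replicate run c ++ c :: rest = List.replicate (run + 1) c ++ rest := by
        simp [List.replicate_succ', List.append_assoc]
      rw [this]
    · next h =>
      rw [ih, pvPairs_replicate_append run prev c h rest]
      have : List.replicate 1 c ++ rest = c :: rest := rfl
      rw [this]
      omega

theorem loopA_eq_pairs (l : List Char) : ∀ (i count : Nat), count < 2 →
    hasTwoPairsLoopA l i count = decide (count + pvPairs (l.drop i) ≥ 2) := by
  intro i count
  induction i, count using hasTwoPairsLoopA.induct (l := l) with
  | case1 i count h heq hc2 =>
    intro hc
    rw [hasTwoPairsLoopA, dif_pos h, if_pos heq, if_pos hc2]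
    have hcount : count = 1 := by
      have : count + 1 = 2 := by simpa using hc2
      omega
    have hd : l.drop i = l[i]'(by omega) :: l[i+1] :: l.drop (i + 2) := by
      rw [List.drop_eq_getElem_cons (by omega)]
      congr 1
      rw [List.drop_eq_getElem_cons (by omega)]
    rw [hd]
    simp only [pvPairs, if_pos heq]
    have : count + (1 + pvPairs (l.drop (i + 2))) ≥ 2 := by omega
    simp [this]
  | case2 i count h heq hc2 ih =>
    intro hc
    rw [hasTwoPairsLoopA, dif_pos h, if_pos heq, if_neg hc2]
    have hcount : count = 0 := by
      have : ¬ (count + 1 = 2) := by simpa using hc2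
      omega
    rw [ih (by omega)]
    have hd : l.drop i = l[i]'(by omega) :: l[i+1] :: l.drop (i + 2) := by
      rw [List.drop_eq_getElem_cons (by omega)]
      congr 1
      rw [List.drop_eq_getElem_cons (by omega)]
    rw [hd]
    simp only [pvPairs, if_pos heq]
    have hre : count + (1 + pvPairs (l.drop (i + 2))) = count + 1 + pvPairs (l.drop (i + 2)) := by
      omega
    rw [hre]
  | case3 i count h heq ih =>
    intro hc
    rw [hasTwoPairsLoopA, dif_pos h, if_neg heq]
    rw [ih hc]
    have hd : l.drop i = l[i]'(by omega) :: l.drop (i + 1) := by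
      rw [List.drop_eq_getElem_cons (by omega)]
    have hd1 : l.drop (i + 1) = l[i+1] :: l.drop (i + 2) := by
      rw [List.drop_eq_getElem_cons (by omega)]
    rw [hd, hd1]
    simp only [pvPairs, if_neg heq]
  | case4 i count h =>
    intro hc
    rw [hasTwoPairsLoopA, dif_neg h]
    have : pvPairs (l.drop i) = 0 := by
      apply pvPairs_short
      have := List.length_drop (l := l) (i := i)
      omega
    rw [this]
    simp
    omega

-- ===== VERDICT (by name: the statement is the Claim_ definition above) =====
theorem has_two_pairs_spec : Claim_equal_has_two_pairs := by
  intro pw _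
  unfold Spec_has_two_pairs has_two_pairs has_two_pairs_alt
  rw [loopA_eq_pairs pw.toList 0 0 (by omega)]
  cases h : pw.toList with
  | nil => simp [pvPairs]
  | cons c rest =>
    show decide (0 + pvPairs ((c :: rest).drop 0) ≥ 2) = decide (hasTwoPairsRuns rest c 1 0 ≥ 2)
    rw [runs_eq_pairs]
    simp [List.replicate]
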